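-- pv_equiv track=rewrite | github.com/LucasNakamuraB/UEM | FA/Listas_FA-ED-main/mem_par.py | rm_idx_par
-- ===== SOURCE A (Python) =====
-- def rm_idx_par(lst):
--     '''
--     remove da lista todos os elementos de índice par
--
--     Exemplos
--
--     >>> rm_idx_par([0, 1, 2, 3, 4])
--     [1, 3]
--     '''
--     count = (len(lst) + 1) // 2
--     for i in range(count):
--         j = i
--         while j < len(lst) - 1:
--             t = lst[j + 1]
--             lst[j + 1] = lst[j]
--             lst[j] = t
--             j += 1
--     for n in range(count):
--         lst.pop()
--     return lst
-- ===== SOURCE B (Python) =====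
-- def rm_idx_par(lst):
--     '''
--     remove da lista todos os elementos de índice par
--
--     Exemplos
--
--     >>> rm_idx_par([0, 1, 2, 3, 4])
--     [1, 3]
--     '''
--     w = 0
--     for r in range(1, len(lst), 2):
--         lst[w] = lst[r]
--         w += 1
--     del lst[w:]
--     return lst
-- ===== Notes on version B (the rewrite author's own statement) =====
-- stated objective: faster
-- what changed: Replaces A's nested bubble-swap passes (each outer step rotates a whole suffix one element at a time) followed by repeated pop() with a single two-pointer in-place compaction: a write index copies each odd-indexed element forward and the unused tail is deleted once.
import Mathlib
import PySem

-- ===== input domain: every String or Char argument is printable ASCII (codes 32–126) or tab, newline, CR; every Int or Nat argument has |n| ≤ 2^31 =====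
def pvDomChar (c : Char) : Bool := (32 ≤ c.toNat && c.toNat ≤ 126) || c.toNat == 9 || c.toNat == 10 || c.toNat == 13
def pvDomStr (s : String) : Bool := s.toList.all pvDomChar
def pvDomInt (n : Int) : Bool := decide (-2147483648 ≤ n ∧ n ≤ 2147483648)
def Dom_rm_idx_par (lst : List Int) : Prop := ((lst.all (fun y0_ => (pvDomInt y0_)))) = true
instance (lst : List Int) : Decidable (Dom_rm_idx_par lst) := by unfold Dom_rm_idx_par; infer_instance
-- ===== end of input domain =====

-- B replaces A's O(n^2) nested bubble-swap passes + repeated pop() with a single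
-- in-place two-pointer compaction (objective: faster; A and B both mutate the
-- argument list in place in Python; the equivalence proved here is about the
-- returned value).

-- ===== PORT A =====
-- inner 'while j < len(lst) - 1: swap lst[j], lst[j+1]; j += 1'
-- (the Nat guard 'j + 1 < lst.length' is exactly Python's 'j < len(lst) - 1' for j ≥ 0)
def pvSwapLoop (lst : List Int) (j : Nat) : List Int :=
  if _h : j + 1 < lst.length then
    let t := lst.getD (j + 1) 0
    pvSwapLoop ((lst.set (j + 1) (lst.getD j 0)).set j t) (j + 1)
  else lst
termination_by lst.length - j
decreasing_by simp only [List.length_set]; omega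

def rm_idx_par (lst : List Int) : List Int :=
  let count := (lst.length + 1) / 2
  let lst1 := (List.range count).foldl (fun acc i => pvSwapLoop acc i) lst
  -- 'for n in range(count): lst.pop()' — pop() removes the last element (never empty here)
  (List.range count).foldl (fun acc _ => acc.dropLast) lst1

-- ===== PORT B =====
def rm_idx_par_alt (lst : List Int) : List Int :=
  -- w = 0; for r in range(1, len(lst), 2): lst[w] = lst[r]; w += 1
  let st := (PySem.List.pyRange 1 (lst.length : Int) 2).foldl
    (fun (st : List Int × Nat) (r : Int) => (st.1.set st.2 (st.1.getD r.toNat 0), st.2 + 1))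
    (lst, 0)
  -- del lst[w:]
  st.1.take st.2

-- ===== PRECONDITION & SPEC =====
def Spec_rm_idx_par (lst : List Int) (out : List Int) : Prop := out = rm_idx_par_alt lst
instance (lst : List Int) (out : List Int) : Decidable (Spec_rm_idx_par lst out) := by unfold Spec_rm_idx_par; infer_instance

-- ===== CLAIM (what is proved, stated in full; the proofs are below) =====
def Claim_equal_rm_idx_par : Prop := ∀ (lst : List Int), Dom_rm_idx_par lst → Spec_rm_idx_par lst (rm_idx_par lst)

-- ===== LEMMAS AND PROOFS =====

-- the odd-indexed elements of a list (the common characterisation both ports are reduced to)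
def pvOdds : List Int → List Int
  | [] => []
  | [_] => []
  | _ :: b :: t => b :: pvOdds t

-- the even-indexed elements
def pvEvens : List Int → List Int
  | [] => []
  | [a] => [a]
  | a :: _ :: t => a :: pvEvens t

theorem pvTwoStep (P : List Int → Prop) (h0 : P []) (h1 : ∀ a, P [a])
    (h2 : ∀ a b t, P t → P (a :: b :: t)) : ∀ l, P l
  | [] => h0
  | [a] => h1 a
  | a :: b :: t => h2 a b t (pvTwoStep P h0 h1 h2 t)

theorem pvGetD_append (pre : List Int) (x : Int) (l : List Int) :
    (pre ++ x :: l).getD pre.length 0 = x := by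
  induction pre with
  | nil => rfl
  | cons y ys ih => simp only [List.cons_append, List.length_cons, List.getD_cons_succ]; exact ih

theorem pvSet_append (pre : List Int) (x : Int) (l : List Int) (v : Int) :
    (pre ++ x :: l).set pre.length v = pre ++ v :: l := by
  induction pre with
  | nil => rfl
  | cons y ys ih => simp only [List.cons_append, List.length_cons, List.set_cons_succ]; rw [ih]

-- the inner while-loop rotates the suffix starting at j one step to the left
theorem pvSwapLoop_rot : ∀ (suf pre : List Int) (x : Int),
    pvSwapLoop (pre ++ x :: suf) pre.length = pre ++ suf ++ [x] := by
  intro suf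
  induction suf with
  | nil =>
    intro pre x
    rw [pvSwapLoop]
    simp
  | cons y t ih =>
    intro pre x
    rw [pvSwapLoop]
    have hlen : pre.length + 1 < (pre ++ x :: y :: t).length := by simp
    simp only [hlen, dif_pos]
    have e1 : (pre ++ x :: y :: t).getD (pre.length + 1) 0 = y := by
      have h := pvGetD_append (pre ++ [x]) y t
      simp only [List.length_append, List.length_cons, List.length_nil,
        List.append_assoc, List.cons_append, List.nil_append] at h
      exact h
    have e2 : (pre ++ x :: y :: t).getD pre.length 0 = x := pvGetD_append pre x (y :: t)
    have e3 : ((pre ++ x :: y :: t).set (pre.length + 1) x).set pre.length y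
        = pre ++ y :: x :: t := by
      have s1 : (pre ++ x :: y :: t).set (pre.length + 1) x = pre ++ x :: x :: t := by
        have h := pvSet_append (pre ++ [x]) y t x
        simp only [List.length_append, List.length_cons, List.length_nil,
          List.append_assoc, List.cons_append, List.nil_append] at h
        exact h
      rw [s1, pvSet_append]
    rw [e1, e2, e3]
    have h := ih (pre ++ [y]) x
    simp only [List.length_append, List.length_cons, List.length_nil,
      List.append_assoc, List.cons_append, List.nil_append] at h ⊢
    exact h

-- the outer for-loop: starting from pre ++ (rest ++ ev), the remaining (|rest|+1)/2
-- rotations move the odd-indexed elements of rest to the front and its even-indexed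
-- elements to the back
theorem pvOuter : ∀ (rest : List Int), ∀ (pre ev : List Int),
    (List.range' pre.length ((rest.length + 1) / 2)).foldl (fun acc i => pvSwapLoop acc i)
        (pre ++ (rest ++ ev))
      = pre ++ (pvOdds rest ++ (ev ++ pvEvens rest)) := by
  refine pvTwoStep _ ?_ ?_ ?_
  · intro pre ev; simp [pvOdds, pvEvens]
  · intro a pre ev
    simp only [List.length_cons, List.length_nil]
    have h1 : (0 + 1 + 1) / 2 = 1 := by norm_num
    rw [h1, List.range'_one]
    simp only [List.foldl_cons, List.foldl_nil]
    have h := pvSwapLoop_rot ev pre a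
    simp only [pvOdds, pvEvens, List.append_assoc, List.cons_append, List.nil_append] at h ⊢
    exact h
  · intro a b t ih pre ev
    have hcnt : ((a :: b :: t).length + 1) / 2 = (t.length + 1) / 2 + 1 := by
      simp only [List.length_cons]; omega
    rw [hcnt, List.range'_succ]
    simp only [List.foldl_cons]
    have hrot : pvSwapLoop (pre ++ (a :: b :: t ++ ev)) pre.length
        = pre ++ (b :: t ++ ev) ++ [a] := by
      have h := pvSwapLoop_rot (b :: t ++ ev) pre a
      simp only [List.cons_append, List.append_assoc] at h ⊢
      exact h
    rw [hrot]
    have := ih (pre ++ [b]) (ev ++ [a])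
    simp only [List.length_append, List.length_cons, List.length_nil] at this ⊢
    have e : pre ++ (b :: t ++ ev) ++ [a] = pre ++ [b] ++ (t ++ (ev ++ [a])) := by
      simp [List.append_assoc]
    rw [e, this]
    simp [pvOdds, pvEvens, List.append_assoc]

theorem pvEvens_length : ∀ (l : List Int), (pvEvens l).length = (l.length + 1) / 2 := by
  refine pvTwoStep _ ?_ ?_ ?_
  · simp [pvEvens]
  · intro a; simp [pvEvens]
  · intro a b t ih; simp only [pvEvens, List.length_cons, ih]; omega

theorem pvDropFold {α : Type} (l : List α) (s : List Int) :
    l.foldl (fun acc _ => acc.dropLast) s = List.dropLast^[l.length] s := by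
  induction l generalizing s with
  | nil => rfl
  | cons x xs ih => simp [List.foldl_cons, ih, Function.iterate_succ_apply]

theorem pvIterDrop : ∀ (ys xs : List Int), List.dropLast^[ys.length] (xs ++ ys) = xs := by
  intro ys
  induction ys using List.reverseRecOn with
  | nil => intro xs; simp
  | append_singleton ys' y ih =>
    intro xs
    rw [List.length_append, List.length_singleton, Function.iterate_succ_apply]
    have : (xs ++ (ys' ++ [y])).dropLast = xs ++ ys' := by
      rw [← List.append_assoc]; exact List.dropLast_concat
    rw [this, ih]

-- A's port returns the odd-indexed elements
theorem pvA_eq_odds (lst : List Int) : rm_idx_par lst = pvOdds lst := by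
  show (List.range ((lst.length + 1) / 2)).foldl (fun acc _ => acc.dropLast)
      ((List.range ((lst.length + 1) / 2)).foldl (fun acc i => pvSwapLoop acc i) lst)
    = pvOdds lst
  have h1 := pvOuter lst [] []
  simp only [List.length_nil, List.nil_append, List.append_nil] at h1
  rw [List.range_eq_range', h1, pvDropFold, List.length_range']
  have h2 : (lst.length + 1) / 2 = (pvEvens lst).length := (pvEvens_length lst).symm
  rw [h2, pvIterDrop]

-- pyRange with step 2: induction forms
theorem pvPyRange_two_nil (a b : Int) (h : b ≤ a) : PySem.List.pyRange a b 2 = [] := by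
  rw [PySem.List.pyRange_of_pos a b (by norm_num)]
  simp [show ¬ a < b by omega]

theorem pvPyRange_two_cons (a b : Int) (h : a < b) :
    PySem.List.pyRange a b 2 = a :: PySem.List.pyRange (a + 2) b 2 := by
  rw [PySem.List.pyRange_of_pos a b (by norm_num),
      PySem.List.pyRange_of_pos (a + 2) b (by norm_num)]
  by_cases h2 : a + 2 < b
  · have e : ((b - a + 2 - 1) / 2).toNat = ((b - (a + 2) + 2 - 1) / 2).toNat + 1 := by
      omega
    rw [if_pos h, if_pos h2, e, List.range_succ_eq_map]
    simp only [List.map_cons, List.map_map, Nat.cast_zero, mul_zero, add_zero]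
    refine congrArg _ (List.map_congr_left ?_)
    intro k _
    simp only [Function.comp_apply, Nat.cast_succ]
    ring
  · have e : ((b - a + 2 - 1) / 2).toNat = 1 := by omega
    rw [if_pos h, if_neg h2, e]
    simp

-- B's fold invariant: with w = |done| elements already compacted and
-- rest the untouched part of the working list from position w on
-- (s = rest.drop w is where the remaining reads land), the loop appends
-- pvOdds s after done and stops
theorem pvBfold : ∀ (s : List Int), ∀ (done rest : List Int) (n : Int),
    rest.drop done.length = s → n = (done.length : Int) + rest.length →
    (PySem.List.pyRange (2 * (done.length : Int) + 1) n 2).foldl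
        (fun (st : List Int × Nat) (r : Int) => (st.1.set st.2 (st.1.getD r.toNat 0), st.2 + 1))
        (done ++ rest, done.length)
      = (done ++ pvOdds s ++ rest.drop (pvOdds s).length,
         done.length + (pvOdds s).length) := by
  refine pvTwoStep _ ?_ ?_ ?_
  · intro done rest n hdrop hn
    have hr : rest.length ≤ done.length := by
      by_contra hc
      exact (List.ne_nil_of_length_pos (by rw [List.length_drop]; omega)) hdrop
    rw [pvPyRange_two_nil _ _ (by omega)]
    simp [pvOdds]
  · intro a done rest n hdrop hn
    have hr : rest.length = done.length + 1 := by
      have := congrArg List.length hdrop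
      rw [List.length_drop] at this
      simp at this
      omega
    rw [pvPyRange_two_nil _ _ (by omega)]
    simp [pvOdds]
  · intro a b t ih done rest n hdrop hn
    have hr : rest.length = done.length + (2 + t.length) := by
      have := congrArg List.length hdrop
      rw [List.length_drop] at this
      simp at this
      omega
    have hlt : 2 * (done.length : Int) + 1 < n := by omega
    rw [pvPyRange_two_cons _ _ hlt]
    simp only [List.foldl_cons]
    have hsplit : rest = rest.take done.length ++ (a :: b :: t) := by
      conv_lhs => rw [← List.take_append_drop done.length rest, hdrop]
    -- the read lst[2w+1] sees the untouched original element b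
    have hread : (done ++ rest).getD (2 * (done.length : Int) + 1).toNat 0 = b := by
      have ht : (2 * (done.length : Int) + 1).toNat
          = (done ++ rest.take done.length ++ [a]).length := by
        simp only [List.length_append, List.length_take, List.length_cons, List.length_nil]
        omega
      have hPl : done ++ rest = (done ++ rest.take done.length ++ [a]) ++ b :: t := by
        conv_lhs => rw [hsplit]
        simp [List.append_assoc]
      rw [ht, hPl, pvGetD_append]
    rw [hread]
    obtain ⟨r0, rtl, hrest⟩ : ∃ r0 rtl, rest = r0 :: rtl := by
      cases rest with
      | nil => exact absurd hr (by simp; omega)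
      | cons r0 rtl => exact ⟨r0, rtl, rfl⟩
    -- the write replaces the head of rest
    have hset : (done ++ rest).set done.length b = (done ++ [b]) ++ rtl := by
      rw [hrest, pvSet_append]
      simp
    rw [hset]
    -- re-establish the invariant one step further
    have hdrop2 : rest.drop (done.length + 2) = t := by
      have h2 := congrArg (List.drop 2) hdrop
      simpa [List.drop_drop, Nat.add_comm] using h2
    have hdrop' : rtl.drop (done.length + 1) = t := by
      have : rest.drop (done.length + 2) = rtl.drop (done.length + 1) := by
        rw [hrest, List.drop_succ_cons]
      rw [← this, hdrop2]
    have hn' : n = ((done.length : Int) + 1) + rtl.length := by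
      have hlen : rest.length = rtl.length + 1 := by rw [hrest]; simp
      rw [hn, hlen]
      push_cast
      ring
    have harg : 2 * (done.length : Int) + 1 + 2 = 2 * ((done.length : Int) + 1) + 1 := by ring
    have hlen1 : (done ++ [b]).length = done.length + 1 := by simp
    have hIH := ih (done ++ [b]) rtl n (by rw [hlen1]; exact hdrop') (by rw [hlen1]; push_cast; exact hn')
    rw [hlen1] at hIH
    push_cast at hIH
    rw [harg, hIH]
    have hdropF : rest.drop ((pvOdds (a :: b :: t)).length) = rtl.drop ((pvOdds t).length) := by
      rw [hrest]
      simp [pvOdds]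
    rw [hdropF]
    simp only [pvOdds, Prod.mk.injEq, List.length_cons, List.cons_append, List.nil_append,
      List.append_assoc]
    exact ⟨trivial, by omega⟩

-- B's port returns the odd-indexed elements
theorem pvB_eq_odds (lst : List Int) : rm_idx_par_alt lst = pvOdds lst := by
  unfold rm_idx_par_alt
  have h := pvBfold lst [] lst (lst.length : Int) (by simp) (by simp)
  simp only [List.length_nil, Nat.cast_zero, mul_zero, zero_add, List.nil_append] at h
  rw [h]
  simp

-- ===== VERDICT (by name: the statement is the Claim_ definition above) =====
theorem rm_idx_par_spec : Claim_equal_rm_idx_par := by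
  intro lst _
  unfold Spec_rm_idx_par
  rw [pvA_eq_odds, pvB_eq_odds]
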